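-- pv_equiv track=rewrite | github.com/hyeonbin123/CordingTest | baekjoon/2263.py | find_preorder
-- ===== SOURCE A (Python) =====
-- def find_preorder(n, inorder, postorder):
--     if not inorder:
--         return []
--
--     position = {val: idx for idx, val in enumerate(inorder)}
--     preorder = []
--     stack = [(0, n - 1, 0, n - 1)]
--
--     while stack:
--         in_start, in_end, post_start, post_end = stack.pop()
--
--         if in_start > in_end or post_start > post_end:
--             continue
--
--         root = postorder[post_end]
--         preorder.append(root)
--
--         root_idx = position[root]
--         left_size = root_idx - in_start
--
--         # 오른쪽 서브트리를 먼저 스택에 추가 (나중에 처리됨)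
--         if root_idx + 1 <= in_end:
--             stack.append((root_idx + 1, in_end, post_start + left_size, post_end - 1))
--
--         # 왼쪽 서브트리를 스택에 추가
--         if in_start <= root_idx - 1:
--             stack.append((in_start, root_idx - 1, post_start, post_start + left_size - 1))
--
--     return preorder
-- ===== SOURCE B (Python) =====
-- def find_preorder(n, inorder, postorder):
--     # Direct divide-and-conquer on list slices: the last postorder element is the
--     # root; split inorder around it and recurse on the two slices.
--     if n <= 0 or not inorder:
--         return []
--     root = postorder[-1]
--     k = inorder.index(root)
--     return ([root]
--             + find_preorder(k, inorder[:k], postorder[:k])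
--             + find_preorder(len(inorder) - k - 1, inorder[k + 1:], postorder[k:-1]))
-- ===== Notes on version B (the rewrite author's own statement) =====
-- stated objective: simpler
-- what changed: Replaces A's explicit worklist stack of (in_start,in_end,post_start,post_end) index quadruples plus a precomputed global position dict with a short direct divide-and-conquer recursion that takes the root from the end of postorder and recurses on list slices around it.
-- outside the precondition, e.g. on find_preorder(1, [1, 2], [1]): A returns [1], B raises IndexError; on find_preorder(1, [0], [0, 1]): A returns [0], B raises ValueError
import Mathlib
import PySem

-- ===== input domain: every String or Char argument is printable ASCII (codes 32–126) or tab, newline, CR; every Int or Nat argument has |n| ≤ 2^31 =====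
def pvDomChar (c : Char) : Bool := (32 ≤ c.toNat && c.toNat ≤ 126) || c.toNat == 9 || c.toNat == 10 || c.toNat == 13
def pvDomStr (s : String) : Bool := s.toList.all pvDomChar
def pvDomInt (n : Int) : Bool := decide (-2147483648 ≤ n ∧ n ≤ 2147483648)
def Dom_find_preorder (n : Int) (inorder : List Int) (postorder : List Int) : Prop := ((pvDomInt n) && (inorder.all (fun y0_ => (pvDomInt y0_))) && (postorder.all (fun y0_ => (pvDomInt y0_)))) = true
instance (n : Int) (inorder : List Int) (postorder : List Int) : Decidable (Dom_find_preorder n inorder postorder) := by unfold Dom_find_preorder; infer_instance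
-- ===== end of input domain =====

-- B replaces A's explicit stack of index quadruples plus a global position dict by a direct
-- divide-and-conquer on list slices (simpler; not faster — A is linear, B copies slices).

-- ===== PORT A =====
-- position = {val: idx for idx, val in enumerate(inorder)}
def pyDictOf (inorder : List Int) : PySem.Dict Int Int :=
  (PySem.List.enumerate inorder 0).foldl (fun d p => d.insert p.2 p.1) PySem.Dict.empty

-- the while-stack loop of A; fuel only makes the recursion total (one unit per iteration;
-- on every input admitted by Pre_ the loop performs at most inorder.length + 1 iterations)
def aLoop (post : List Int) (pos : PySem.Dict Int Int) :
    Nat → List (Int × Int × Int × Int) → List Int → List Int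
  | 0, _, acc => acc
  | _ + 1, [], acc => acc
  | fuel + 1, (inS, inE, postS, postE) :: st, acc =>
    if inS > inE ∨ postS > postE then aLoop post pos fuel st acc
    else
      match PySem.List.pyGet? post postE with
      | none => acc          -- IndexError (excluded by Pre_)
      | some root =>
        let acc := acc ++ [root]
        match pos.get? root with
        | none => acc        -- KeyError (excluded by Pre_)
        | some rootIdx =>
          let leftSize := rootIdx - inS
          let st := if rootIdx + 1 ≤ inE then (rootIdx + 1, inE, postS + leftSize, postE - 1) :: st else st
          let st := if inS ≤ rootIdx - 1 then (inS, rootIdx - 1, postS, postS + leftSize - 1) :: st else st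
          aLoop post pos fuel st acc

def find_preorder (n : Int) (inorder : List Int) (postorder : List Int) : List Int :=
  if inorder = [] then []
  else aLoop postorder (pyDictOf inorder) (inorder.length + 1) [(0, n - 1, 0, n - 1)] []

-- ===== PORT B =====
-- fuel only makes the recursion total (call depth; under Pre_ every recursive call strictly
-- shrinks the postorder slice, so postorder.length + 1 suffices)
def bGo : Nat → Int → List Int → List Int → List Int
  | 0, _, _, _ => []       -- fuel exhausted (unreachable under Pre_)
  | fuel + 1, n, inorder, postorder =>
    if n ≤ 0 ∨ inorder = [] then []
    else
      match PySem.List.pyGet? postorder (-1) with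
      | none => []          -- IndexError (excluded by Pre_)
      | some root =>
        match PySem.List.index? inorder root with
        | none => []        -- ValueError (excluded by Pre_)
        | some k =>
          [root]
            ++ bGo fuel (k : Int) (PySem.List.slice inorder none (some (k : Int)))
                 (PySem.List.slice postorder none (some (k : Int)))
            ++ bGo fuel ((inorder.length : Int) - (k : Int) - 1)
                 (PySem.List.slice inorder (some ((k : Int) + 1)) none)
                 (PySem.List.slice postorder (some (k : Int)) (some (-1)))

def find_preorder_alt (n : Int) (inorder : List Int) (postorder : List Int) : List Int :=
  bGo (postorder.length + 1) n inorder postorder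

-- ===== PRECONDITION & SPEC =====
-- recogniser of matching (inorder, postorder) traversal pairs: the last postorder element is
-- the root and the two lists split consistently around it (a shape condition on the two lists,
-- checked by splitting them — neither port's dict/stack/index machinery appears here)
def isPairGo : Nat → List Int → List Int → Bool
  | _, inorder, [] => inorder.isEmpty
  | 0, _, _ :: _ => false
  | d + 1, inorder, p :: ps =>
    let r := (p :: ps).getLast (by simp)
    if h : r ∈ inorder then
      let k := inorder.idxOf r
      isPairGo d (inorder.take k) ((p :: ps).dropLast.take k) &&
      isPairGo d (inorder.drop (k + 1)) ((p :: ps).dropLast.drop k)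
    else false

def isPair (inorder postorder : List Int) : Bool :=
  isPairGo postorder.length inorder postorder

-- Pre_ excludes inputs whose n and list lengths disagree or whose lists are not a
-- duplicate-free matching traversal pair: on those A raises KeyError/IndexError, loops
-- forever, or returns a value read off an accidental prefix window of the lists.
def Pre_find_preorder (n : Int) (inorder : List Int) (postorder : List Int) : Prop :=
  n ≤ 0 ∨ inorder = [] ∨
    (n = inorder.length ∧ postorder.length = inorder.length ∧ inorder.Nodup ∧
      isPair inorder postorder = true)
instance (n : Int) (inorder : List Int) (postorder : List Int) : Decidable (Pre_find_preorder n inorder postorder) := by unfold Pre_find_preorder; infer_instance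

def pvWitness_find_preorder : Int × List Int × List Int := (2, [1, 2], [1, 2])

def Spec_find_preorder (n : Int) (inorder : List Int) (postorder : List Int) (out : List Int) : Prop := out = find_preorder_alt n inorder postorder
instance (n : Int) (inorder : List Int) (postorder : List Int) (out : List Int) : Decidable (Spec_find_preorder n inorder postorder out) := by unfold Spec_find_preorder; infer_instance

-- ===== CLAIM (what is proved, stated in full; the proofs are below) =====
def Claim_equal_find_preorder : Prop := ∀ (n : Int) (inorder : List Int) (postorder : List Int), Dom_find_preorder n inorder postorder → Pre_find_preorder n inorder postorder → Spec_find_preorder n inorder postorder (find_preorder n inorder postorder)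

-- ===== LEMMAS AND PROOFS =====

-- binary trees: the common shape behind both programs
inductive BT
  | nil : BT
  | node : BT → Int → BT → BT

def sizeT : BT → Nat
  | .nil => 0
  | .node l _ r => sizeT l + 1 + sizeT r

def inT : BT → List Int
  | .nil => []
  | .node l v r => inT l ++ v :: inT r

def postT : BT → List Int
  | .nil => []
  | .node l v r => postT l ++ postT r ++ [v]

def preT : BT → List Int
  | .nil => []
  | .node l v r => v :: (preT l ++ preT r)

theorem length_inT (t : BT) : (inT t).length = sizeT t := by
  induction t with
  | nil => rfl
  | node l v r ihl ihr => simp [inT, sizeT, ihl, ihr]; omega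

theorem length_postT (t : BT) : (postT t).length = sizeT t := by
  induction t with
  | nil => rfl
  | node l v r ihl ihr => simp [postT, sizeT, ihl, ihr]; omega

theorem sizeT_eq_zero_iff (t : BT) : sizeT t = 0 ↔ t = BT.nil := by
  cases t <;> simp [sizeT]

theorem isPairGo_sound : ∀ (d : Nat) (inorder postorder : List Int),
    isPairGo d inorder postorder = true →
    ∃ t : BT, inT t = inorder ∧ postT t = postorder := by
  intro d
  induction d with
  | zero =>
    intro ino post h
    cases post with
    | nil => exact ⟨BT.nil, by simpa [inT, postT] using List.isEmpty_iff.mp h⟩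
    | cons p ps => simp [isPairGo] at h
  | succ d ih =>
    intro ino post h
    cases post with
    | nil => exact ⟨BT.nil, by simpa [inT, postT] using List.isEmpty_iff.mp h⟩
    | cons p ps =>
      rw [isPairGo] at h
      by_cases hmem : (p :: ps).getLast (by simp) ∈ ino
      · rw [dif_pos hmem, Bool.and_eq_true] at h
        set r := (p :: ps).getLast (by simp) with hr
        set k := ino.idxOf r with hkdef
        obtain ⟨tl, htl1, htl2⟩ := ih _ _ h.1
        obtain ⟨tr, htr1, htr2⟩ := ih _ _ h.2
        refine ⟨BT.node tl r tr, ?_, ?_⟩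
        · have hk : k < ino.length := List.idxOf_lt_length_of_mem hmem
          have hg : ino[k]'hk = r := List.getElem_idxOf hk
          calc inT (BT.node tl r tr) = ino.take k ++ r :: ino.drop (k + 1) := by
                simp [inT, htl1, htr1]
            _ = ino.take k ++ ino.drop k := by rw [List.drop_eq_getElem_cons hk, hg]
            _ = ino := List.take_append_drop k ino
        · calc postT (BT.node tl r tr)
              = ((p :: ps).dropLast.take k ++ (p :: ps).dropLast.drop k) ++ [r] := by
                simp [postT, htl2, htr2]
            _ = (p :: ps).dropLast ++ [r] := by rw [List.take_append_drop]
            _ = p :: ps := List.dropLast_concat_getLast (by simp)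
      · rw [dif_neg hmem] at h
        exact absurd h (by simp)

theorem isPair_sound (inorder postorder : List Int) (h : isPair inorder postorder = true) :
    ∃ t : BT, inT t = inorder ∧ postT t = postorder :=
  isPairGo_sound postorder.length inorder postorder h

theorem slice_mid (xs : List Int) (k : Nat) :
    PySem.List.slice xs (some (k:Int)) (some (-1)) = (xs.drop k).take (xs.length - 1 - k) := by
  simp only [PySem.List.slice, PySem.List.clampIdx_neg_one, PySem.List.clampIdx_natCast]
  rcases Nat.le_total k xs.length with h | h
  · rw [min_eq_left h]
  · rw [min_eq_right h, List.drop_eq_nil_of_le h, List.drop_eq_nil_of_le (by omega)]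
    simp

theorem bGo_correct : ∀ (t : BT) (fuel : Nat), (inT t).Nodup → sizeT t < fuel →
    bGo fuel (sizeT t) (inT t) (postT t) = preT t := by
  intro t
  induction t with
  | nil =>
    intro fuel _ hf
    obtain ⟨f, rfl⟩ : ∃ f, fuel = f + 1 := ⟨fuel - 1, by omega⟩
    simp [bGo, sizeT, inT, preT]
  | node l v r ihl ihr =>
    intro fuel hnd hf
    obtain ⟨f, rfl⟩ : ∃ f, fuel = f + 1 := ⟨fuel - 1, by omega⟩
    have hnd' := hnd
    rw [show inT (BT.node l v r) = inT l ++ v :: inT r from rfl, List.nodup_middle,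
      List.nodup_cons] at hnd'
    obtain ⟨hvnot, hndlr⟩ := hnd'
    have hndl : (inT l).Nodup := hndlr.of_append_left
    have hndr : (inT r).Nodup := hndlr.of_append_right
    have hvnotl : v ∉ inT l := fun hc => hvnot (List.mem_append_left _ hc)
    -- guard is false
    rw [bGo, if_neg (by
      push Not
      refine ⟨by simp [sizeT]; omega, ?_⟩
      intro hc
      have h0 := length_inT (BT.node l v r)
      rw [hc] at h0
      simp [sizeT] at h0
      omega)]
    -- root = last of postorder
    have hroot : PySem.List.pyGet? (postT (BT.node l v r)) (-1) = some v := by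
      show PySem.List.pyGet? (postT l ++ postT r ++ [v]) (-1) = some v
      rw [PySem.List.pyGet?_neg_one]; simp
    rw [hroot]
    simp only []
    -- k = index of root in inorder
    have hidx : PySem.List.index? (inT (BT.node l v r)) v = some (sizeT l) := by
      apply (PySem.List.index?_eq_some_iff _ _ _).2
      exact ⟨inT l, inT r, rfl, length_inT l, hvnotl⟩
    rw [hidx]
    simp only []
    -- the four slices
    have e1 : PySem.List.slice (inT (BT.node l v r)) none (some ((sizeT l : Nat) : Int)) = inT l := by
      rw [PySem.List.slice_to_natCast]
      show (inT l ++ v :: inT r).take (sizeT l) = inT l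
      exact List.take_left' (length_inT l)
    have e2 : PySem.List.slice (postT (BT.node l v r)) none (some ((sizeT l : Nat) : Int)) = postT l := by
      rw [PySem.List.slice_to_natCast]
      show (postT l ++ postT r ++ [v]).take (sizeT l) = postT l
      rw [List.append_assoc]
      exact List.take_left' (length_postT l)
    have e3 : PySem.List.slice (inT (BT.node l v r)) (some (((sizeT l : Nat) : Int) + 1)) none = inT r := by
      rw [show (((sizeT l : Nat) : Int) + 1) = ((sizeT l + 1 : Nat) : Int) by push_cast; ring,
        PySem.List.slice_from_natCast]
      show (inT l ++ v :: inT r).drop (sizeT l + 1) = inT r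
      rw [show inT l ++ v :: inT r = (inT l ++ [v]) ++ inT r by simp]
      exact List.drop_left' (by simp [length_inT])
    have e4 : PySem.List.slice (postT (BT.node l v r)) (some ((sizeT l : Nat) : Int)) (some (-1)) = postT r := by
      rw [slice_mid]
      show ((postT l ++ postT r ++ [v]).drop (sizeT l)).take ((postT l ++ postT r ++ [v]).length - 1 - sizeT l) = postT r
      rw [show (postT l ++ postT r ++ [v]).length - 1 - sizeT l = sizeT r by
            simp [length_postT l, length_postT r],
        List.append_assoc, List.drop_left' (length_postT l)]
      exact List.take_left' (length_postT r)
    rw [e1, e2, e3, e4]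
    -- n argument of the right call
    have e5 : ((inT (BT.node l v r)).length : Int) - ((sizeT l : Nat) : Int) - 1 = ((sizeT r : Nat) : Int) := by
      rw [length_inT]
      show ((sizeT l + 1 + sizeT r : Nat) : Int) - _ - 1 = _
      push_cast; ring
    rw [e5]
    rw [ihl f hndl (by simp [sizeT] at hf; omega), ihr f hndr (by simp [sizeT] at hf; omega)]
    simp [preT]

theorem nodup_idxOf_eq {l : List Int} (h : l.Nodup) {j : Nat} {v : Int}
    (hj : l[j]? = some v) : l.idxOf v = j := by
  have hjl : j < l.length := by
    by_contra hc
    rw [List.getElem?_eq_none (by omega)] at hj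
    simp at hj
  have hv : v ∈ l := List.mem_of_getElem? hj
  have h1 : l.idxOf v < l.length := List.idxOf_lt_length_of_mem hv
  have h2 : l[l.idxOf v]'h1 = v := List.getElem_idxOf h1
  have h3 : l[j]'hjl = v := by
    have := hj; simp [List.getElem?_eq_getElem hjl] at this; exact this
  exact (List.Nodup.getElem_inj_iff h).mp (by rw [h2, h3])
theorem pyDictOf_get (inorder : List Int) (h : inorder.Nodup) (v : Int) (hv : v ∈ inorder) :
    (pyDictOf inorder).get? v = some (inorder.idxOf v : Int) := by
  have hfresh : ∀ a ∈ PySem.List.enumerate inorder 0, (PySem.Dict.empty (κ := Int) (ν := Int)).contains a.2 = false := by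
    intro a _; simp [PySem.Dict.contains_empty]
  have hnd2 : ((PySem.List.enumerate inorder 0).map (·.2)).Nodup := by
    rw [PySem.List.map_snd_enumerate]; exact h
  have hitems : (pyDictOf inorder).items
      = (PySem.Dict.empty (κ := Int) (ν := Int)).items
        ++ (PySem.List.enumerate inorder 0).map (fun a => (a.2, a.1)) :=
    PySem.Dict.items_foldl_insert_fresh (PySem.List.enumerate inorder 0)
      (fun p : Int × Int => p.2) (fun p : Int × Int => p.1) PySem.Dict.empty hfresh hnd2
  have hkeysnd : (pyDictOf inorder).keys.Nodup :=
    PySem.Dict.nodup_keys_foldl_insert_key (PySem.List.enumerate inorder 0)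
      (fun p : Int × Int => p.2) (fun _ p => p.1) PySem.Dict.empty (by simp [PySem.Dict.keys_empty])
  have hmemitem : (v, (inorder.idxOf v : Int)) ∈ (pyDictOf inorder).items := by
    rw [hitems]
    have hk : inorder.idxOf v < inorder.length := List.idxOf_lt_length_of_mem hv
    have : ((0 : Int) + (inorder.idxOf v : Nat), inorder[inorder.idxOf v]'hk) ∈ PySem.List.enumerate inorder 0 := by
      rw [PySem.List.mem_enumerate_iff]
      exact ⟨inorder.idxOf v, hk, rfl⟩
    simp only [List.mem_append, List.mem_map]
    right
    exact ⟨_, this, by simp [List.getElem_idxOf hk]⟩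
  exact PySem.Dict.get?_of_mem_items _ hmemitem hkeysnd

theorem aLoop_sub (inorder postorder : List Int) (hnd : inorder.Nodup) :
    ∀ (t : BT) (fuel : Nat) (i p : Nat) (st : List (Int × Int × Int × Int)) (acc : List Int)
      (isv iev psv pev : Int),
      1 ≤ sizeT t → sizeT t ≤ fuel →
      i + sizeT t ≤ inorder.length → p + sizeT t ≤ postorder.length →
      inT t = (inorder.drop i).take (sizeT t) →
      postT t = (postorder.drop p).take (sizeT t) →
      isv = (i : Int) → iev = (i : Int) + (sizeT t : Int) - 1 →
      psv = (p : Int) → pev = (p : Int) + (sizeT t : Int) - 1 →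
      aLoop postorder (pyDictOf inorder) fuel ((isv, iev, psv, pev) :: st) acc
        = aLoop postorder (pyDictOf inorder) (fuel - sizeT t) st (acc ++ preT t) := by
  intro t
  induction t with
  | nil => intro _ _ _ _ _ _ _ _ _ h1; simp [sizeT] at h1
  | node l v r ihl ihr =>
    intro fuel i p st acc isv iev psv pev h1 hfuel hilen hplen hin hpost hisv hiev hpsv hpev
    subst hisv hiev hpsv hpev
    obtain ⟨f, rfl⟩ : ∃ f, fuel = f + 1 := ⟨fuel - 1, by omega⟩
    have hs : sizeT (BT.node l v r) = sizeT l + 1 + sizeT r := rfl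
    rw [hs] at h1 hfuel hilen hplen
    have hin' : inT l ++ v :: inT r = (inorder.drop i).take (sizeT l + 1 + sizeT r) := by
      rw [← hs, ← hin]; rfl
    have hpost' : postT l ++ postT r ++ [v] = (postorder.drop p).take (sizeT l + 1 + sizeT r) := by
      rw [← hs, ← hpost]; rfl
    rw [aLoop]
    rw [if_neg (by rw [hs]; push_cast; omega)]
    -- root lookup
    have hroot : PySem.List.pyGet? postorder ((p : Int) + (sizeT (BT.node l v r) : Int) - 1) = some v := by
      rw [show ((p : Int) + (sizeT (BT.node l v r) : Int) - 1) = ((p + (sizeT l + sizeT r) : Nat) : Int) by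
            rw [hs]; push_cast; omega,
        PySem.List.pyGet?_natCast,
        ← List.getElem?_drop,
        ← List.getElem?_take_of_lt (show sizeT l + sizeT r < sizeT l + 1 + sizeT r by omega),
        ← hpost',
        show sizeT l + sizeT r = (postT l ++ postT r).length by simp [length_postT]]
      exact List.getElem?_concat_length
    rw [hroot]
    simp only []
    -- position lookup
    have hvino : inorder[i + sizeT l]? = some v := by
      rw [← List.getElem?_drop,
        ← List.getElem?_take_of_lt (show sizeT l < sizeT l + 1 + sizeT r by omega),
        ← hin',
        show sizeT l = (inT l).length from (length_inT l).symm]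
      simp
    have hpos : (pyDictOf inorder).get? v = some ((i + sizeT l : Nat) : Int) := by
      rw [pyDictOf_get inorder hnd v (List.mem_of_getElem? hvino), nodup_idxOf_eq hnd hvino]
    rw [hpos]
    simp only []
    -- child slice facts
    have hinl : inT l = (inorder.drop i).take (sizeT l) := by
      have h0 := congrArg (List.take (sizeT l)) hin'
      rw [List.take_take, min_eq_left (by omega),
        List.take_left' (length_inT l)] at h0
      exact h0
    have hinr : inT r = (inorder.drop (i + (sizeT l + 1))).take (sizeT r) := by
      have h0 := congrArg (List.drop (sizeT l + 1)) hin'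
      rw [List.drop_take, List.drop_drop,
        show inT l ++ v :: inT r = (inT l ++ [v]) ++ inT r by simp,
        List.drop_left' (by simp [length_inT]),
        show sizeT l + 1 + sizeT r - (sizeT l + 1) = sizeT r by omega] at h0
      exact h0
    have hpostl : postT l = (postorder.drop p).take (sizeT l) := by
      have h0 := congrArg (List.take (sizeT l)) hpost'
      rw [List.take_take, min_eq_left (by omega), List.append_assoc,
        List.take_left' (length_postT l)] at h0
      exact h0
    have hpostr : postT r = (postorder.drop (p + sizeT l)).take (sizeT r) := by
      have h0 := congrArg (List.drop (sizeT l)) hpost'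
      rw [List.drop_take, List.drop_drop, List.append_assoc,
        List.drop_left' (length_postT l)] at h0
      have h2 := congrArg (List.take (sizeT r)) h0
      rw [List.take_left' (length_postT r), List.take_take,
        min_eq_left (by omega)] at h2
      exact h2
    -- guards for the two pushes, four cases (the left-push `if` is outermost)
    by_cases hlpos : 1 ≤ sizeT l
    · rw [if_pos (by push_cast; omega)]
      by_cases hrpos : 1 ≤ sizeT r
      · rw [if_pos (by rw [hs]; push_cast; omega)]
        rw [ihl f i p _ _ _ _ _ _ hlpos (by omega) (by omega) (by omega) hinl hpostl
          rfl (by push_cast; omega) rfl (by push_cast; omega)]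
        rw [ihr (f - sizeT l) (i + (sizeT l + 1)) (p + sizeT l) _ _ _ _ _ _ hrpos
          (by omega) (by omega) (by omega) hinr hpostr
          (by push_cast; omega) (by rw [hs]; push_cast; omega)
          (by push_cast; omega) (by rw [hs]; push_cast; omega)]
        rw [show f + 1 - sizeT (BT.node l v r) = f - sizeT l - sizeT r by rw [hs]; omega]
        simp [preT]
      · have hrnil : r = BT.nil := (sizeT_eq_zero_iff r).mp (by omega)
        rw [if_neg (by rw [hs]; push_cast; omega)]
        rw [ihl f i p _ _ _ _ _ _ hlpos (by omega) (by omega) (by omega) hinl hpostl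
          rfl (by push_cast; omega) rfl (by push_cast; omega)]
        rw [show f + 1 - sizeT (BT.node l v r) = f - sizeT l by rw [hs]; omega]
        simp [preT, hrnil]
    · have hlnil : l = BT.nil := (sizeT_eq_zero_iff l).mp (by omega)
      rw [if_neg (by push_cast; omega)]
      by_cases hrpos : 1 ≤ sizeT r
      · rw [if_pos (by rw [hs]; push_cast; omega)]
        rw [ihr f (i + (sizeT l + 1)) (p + sizeT l) _ _ _ _ _ _ hrpos
          (by omega) (by omega) (by omega) hinr hpostr
          (by push_cast; omega) (by rw [hs]; push_cast; omega)
          (by push_cast; omega) (by rw [hs]; push_cast; omega)]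
        rw [show f + 1 - sizeT (BT.node l v r) = f - sizeT r by rw [hs]; omega]
        simp [preT, hlnil]
      · have hrnil : r = BT.nil := (sizeT_eq_zero_iff r).mp (by omega)
        rw [if_neg (by rw [hs]; push_cast; omega)]
        rw [show f + 1 - sizeT (BT.node l v r) = f by rw [hs]; omega]
        simp [preT, hlnil, hrnil]

-- ===== VERDICT (by name: the statement is the Claim_ definition above) =====
theorem find_preorder_spec : Claim_equal_find_preorder := by
  unfold Claim_equal_find_preorder
  intro n ino post _ hpre
  unfold Spec_find_preorder
  by_cases hino : ino = []
  · subst hino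
    simp [find_preorder, find_preorder_alt, bGo]
  · rcases hpre with hn | h | ⟨hn, hlen, hnd, hpair⟩
    · -- n ≤ 0 with a nonempty inorder: both sides return []
      obtain ⟨m, hm⟩ : ∃ m, ino.length = m + 1 :=
        ⟨ino.length - 1, by cases ino with | nil => exact absurd rfl hino | cons a l => simp⟩
      rw [find_preorder, if_neg hino, hm]
      rw [show m + 1 + 1 = (m + 1) + 1 from rfl, aLoop, if_pos (by omega)]
      obtain ⟨g, hg⟩ : ∃ g, post.length + 1 = g + 1 := ⟨post.length, rfl⟩
      rw [show aLoop post (pyDictOf ino) (m + 1) [] [] = [] from by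
        cases m <;> rfl]
      rw [find_preorder_alt, hg, bGo, if_pos (Or.inl hn)]
    · exact absurd h hino
    · obtain ⟨t, hint, hpostt⟩ := isPair_sound ino post hpair
      have hsz : sizeT t = ino.length := by rw [← hint, length_inT]
      have hszpos : 1 ≤ sizeT t := by
        rw [hsz]; cases ino with | nil => exact absurd rfl hino | cons a l => simp
      have hA : find_preorder n ino post = preT t := by
        rw [find_preorder, if_neg hino]
        rw [aLoop_sub ino post hnd t (ino.length + 1) 0 0 [] []
          ((0 : Int)) (n - 1) ((0 : Int)) (n - 1)
          hszpos (by omega) (by omega) (by omega)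
          (by rw [hint]; simp [hsz])
          (by rw [hpostt]; simp [hsz, hlen])
          (by norm_num) (by push_cast; omega) (by norm_num) (by push_cast; omega)]
        rw [show ino.length + 1 - sizeT t = 1 by omega]
        rfl
      have hB : find_preorder_alt n ino post = preT t := by
        rw [find_preorder_alt, show n = ((sizeT t : Nat) : Int) by push_cast; omega,
          ← hint, ← hpostt]
        exact bGo_correct t ((postT t).length + 1) (hint ▸ hnd)
          (by rw [length_postT]; omega)
      rw [hA, hB]
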